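-- pv_equiv track=rewrite | github.com/vcodestudio/VIGA | servers/generator/blender.py | _is_description_match
-- ===== SOURCE A (Python) =====
-- def _is_description_match(class_name: str, description: str) -> bool:
--     description_lower = description.lower()
--     class_name_lower = class_name.lower()
--     if class_name_lower in description_lower or description_lower in class_name_lower:
--         return True
--     synonyms = {
--         'person': ['human', 'people', 'man', 'woman', 'child'],
--         'car': ['vehicle', 'automobile', 'auto'],
--         'dog': ['puppy', 'canine'],
--         'cat': ['kitten', 'feline'],
--         'bird': ['flying', 'winged'],
--         'tree': ['plant', 'vegetation'],
--         'building': ['house', 'structure', 'architecture'],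
--         'chair': ['seat', 'furniture'],
--         'table': ['desk', 'surface'],
--         'book': ['text', 'reading', 'literature']
--     }
--     for key, values in synonyms.items():
--         if class_name_lower == key and any(v in description_lower for v in values):
--             return True
--         if any(v == class_name_lower for v in values) and key in description_lower:
--             return True
--     return False
-- ===== SOURCE B (Python) =====
-- # B: one-shot reverse-lookup table (term -> substrings to search for) replaces A's loop over the synonyms dict.
-- _SYNONYMS = {
--     'person': ['human', 'people', 'man', 'woman', 'child'],
--     'car': ['vehicle', 'automobile', 'auto'],
--     'dog': ['puppy', 'canine'],
--     'cat': ['kitten', 'feline'],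
--     'bird': ['flying', 'winged'],
--     'tree': ['plant', 'vegetation'],
--     'building': ['house', 'structure', 'architecture'],
--     'chair': ['seat', 'furniture'],
--     'table': ['desk', 'surface'],
--     'book': ['text', 'reading', 'literature']
-- }
-- _LOOKUP = {}
-- for _k, _vs in _SYNONYMS.items():
--     _LOOKUP[_k] = list(_vs)
--     for _v in _vs:
--         _LOOKUP.setdefault(_v, []).append(_k)
--
-- def _is_description_match(class_name: str, description: str) -> bool:
--     description_lower = description.lower()
--     class_name_lower = class_name.lower()
--     if class_name_lower in description_lower or description_lower in class_name_lower:
--         return True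
--     return any(t in description_lower for t in _LOOKUP.get(class_name_lower, []))
-- ===== Notes on version B (the rewrite author's own statement) =====
-- stated objective: simpler
-- what changed: Replaces A's per-call double loop over the synonyms dict (each key compared to class_name and each value list scanned twice) by a reverse-lookup table built once (term -> substrings to search), so each call is a single dict lookup plus one scan of the associated terms.
import Mathlib
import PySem

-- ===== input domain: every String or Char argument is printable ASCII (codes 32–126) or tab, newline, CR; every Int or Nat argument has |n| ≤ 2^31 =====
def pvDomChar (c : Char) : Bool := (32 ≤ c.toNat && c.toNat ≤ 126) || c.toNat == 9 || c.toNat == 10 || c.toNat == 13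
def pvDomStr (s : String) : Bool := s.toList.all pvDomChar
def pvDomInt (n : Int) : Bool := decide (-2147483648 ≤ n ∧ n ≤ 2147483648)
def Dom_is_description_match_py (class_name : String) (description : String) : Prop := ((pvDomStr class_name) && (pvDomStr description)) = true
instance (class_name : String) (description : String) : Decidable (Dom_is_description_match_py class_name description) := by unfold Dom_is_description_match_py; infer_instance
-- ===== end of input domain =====

-- B replaces A's per-call double loop over the synonyms table by a reverse-lookup table built once
-- (term -> substrings to search), so a call is one lookup plus one scan; same result, simpler call path.

-- ===== PORT A =====
def pvSynonyms : List (String × List String) := [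
  ("person", ["human", "people", "man", "woman", "child"]),
  ("car", ["vehicle", "automobile", "auto"]),
  ("dog", ["puppy", "canine"]),
  ("cat", ["kitten", "feline"]),
  ("bird", ["flying", "winged"]),
  ("tree", ["plant", "vegetation"]),
  ("building", ["house", "structure", "architecture"]),
  ("chair", ["seat", "furniture"]),
  ("table", ["desk", "surface"]),
  ("book", ["text", "reading", "literature"])]

def pvLoopA (cl dl : String) : List (String × List String) → Bool
  | [] => false
  | (k, vs) :: rest =>
    if cl == k && vs.any (fun v => PySem.Str.isIn v dl) then true
    else if vs.any (fun v => v == cl) && PySem.Str.isIn k dl then true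
    else pvLoopA cl dl rest

def is_description_match_py (class_name : String) (description : String) : Bool :=
  let description_lower := PySem.Str.lower description
  let class_name_lower := PySem.Str.lower class_name
  if PySem.Str.isIn class_name_lower description_lower || PySem.Str.isIn description_lower class_name_lower then
    true
  else
    pvLoopA class_name_lower description_lower pvSynonyms

-- ===== PORT B =====
-- module-level table build: _LOOKUP[k] = list(vs); _LOOKUP.setdefault(v, []).append(k)
def pvLookup : PySem.Dict String (List String) :=
  pvSynonyms.foldl (fun d kv =>
    let d := d.insert kv.1 kv.2
    kv.2.foldl (fun d v => d.insert v ((d.getD v []) ++ [kv.1])) d) PySem.Dict.empty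

def is_description_match_py_alt (class_name : String) (description : String) : Bool :=
  let description_lower := PySem.Str.lower description
  let class_name_lower := PySem.Str.lower class_name
  if PySem.Str.isIn class_name_lower description_lower || PySem.Str.isIn description_lower class_name_lower then
    true
  else
    (pvLookup.getD class_name_lower []).any (fun t => PySem.Str.isIn t description_lower)

-- ===== PRECONDITION & SPEC =====
def Spec_is_description_match_py (class_name : String) (description : String) (out : Bool) : Prop := out = is_description_match_py_alt class_name description
instance (class_name : String) (description : String) (out : Bool) : Decidable (Spec_is_description_match_py class_name description out) := by unfold Spec_is_description_match_py; infer_instance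

-- ===== CLAIM (what is proved, stated in full; the proofs are below) =====
def Claim_equal_is_description_match_py : Prop := ∀ (class_name : String) (description : String), Dom_is_description_match_py class_name description → Spec_is_description_match_py class_name description (is_description_match_py class_name description)

-- ===== LEMMAS AND PROOFS =====
-- pvLookup, a closed constant, evaluated once to its literal value
set_option maxRecDepth 8000 in
theorem pvLookup_eq : pvLookup.items = [
  ("person", ["human", "people", "man", "woman", "child"]),
  ("human", ["person"]),
  ("people", ["person"]),
  ("man", ["person"]),
  ("woman", ["person"]),
  ("child", ["person"]),
  ("car", ["vehicle", "automobile", "auto"]),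
  ("vehicle", ["car"]),
  ("automobile", ["car"]),
  ("auto", ["car"]),
  ("dog", ["puppy", "canine"]),
  ("puppy", ["dog"]),
  ("canine", ["dog"]),
  ("cat", ["kitten", "feline"]),
  ("kitten", ["cat"]),
  ("feline", ["cat"]),
  ("bird", ["flying", "winged"]),
  ("flying", ["bird"]),
  ("winged", ["bird"]),
  ("tree", ["plant", "vegetation"]),
  ("plant", ["tree"]),
  ("vegetation", ["tree"]),
  ("building", ["house", "structure", "architecture"]),
  ("house", ["building"]),
  ("structure", ["building"]),
  ("architecture", ["building"]),
  ("chair", ["seat", "furniture"]),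
  ("seat", ["chair"]),
  ("furniture", ["chair"]),
  ("table", ["desk", "surface"]),
  ("desk", ["table"]),
  ("surface", ["table"]),
  ("book", ["text", "reading", "literature"]),
  ("text", ["book"]),
  ("reading", ["book"]),
  ("literature", ["book"])] := by decide

theorem pvLoop_eq_lookup (cl dl : String) :
    pvLoopA cl dl pvSynonyms = (pvLookup.getD cl []).any (fun t => PySem.Str.isIn t dl) := by
  by_cases h0 : cl = "person"
  · subst h0
    simp [pvLoopA, pvSynonyms, PySem.Dict.getD, PySem.Dict.get?, pvLookup_eq]
  by_cases h1 : cl = "car"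
  · subst h1
    simp [pvLoopA, pvSynonyms, PySem.Dict.getD, PySem.Dict.get?, pvLookup_eq]
  by_cases h2 : cl = "dog"
  · subst h2
    simp [pvLoopA, pvSynonyms, PySem.Dict.getD, PySem.Dict.get?, pvLookup_eq]
  by_cases h3 : cl = "cat"
  · subst h3
    simp [pvLoopA, pvSynonyms, PySem.Dict.getD, PySem.Dict.get?, pvLookup_eq]
  by_cases h4 : cl = "bird"
  · subst h4
    simp [pvLoopA, pvSynonyms, PySem.Dict.getD, PySem.Dict.get?, pvLookup_eq]
  by_cases h5 : cl = "tree"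
  · subst h5
    simp [pvLoopA, pvSynonyms, PySem.Dict.getD, PySem.Dict.get?, pvLookup_eq]
  by_cases h6 : cl = "building"
  · subst h6
    simp [pvLoopA, pvSynonyms, PySem.Dict.getD, PySem.Dict.get?, pvLookup_eq]
  by_cases h7 : cl = "chair"
  · subst h7
    simp [pvLoopA, pvSynonyms, PySem.Dict.getD, PySem.Dict.get?, pvLookup_eq]
  by_cases h8 : cl = "table"
  · subst h8
    simp [pvLoopA, pvSynonyms, PySem.Dict.getD, PySem.Dict.get?, pvLookup_eq]
  by_cases h9 : cl = "book"
  · subst h9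
    simp [pvLoopA, pvSynonyms, PySem.Dict.getD, PySem.Dict.get?, pvLookup_eq]
  by_cases h10 : cl = "human"
  · subst h10
    simp [pvLoopA, pvSynonyms, PySem.Dict.getD, PySem.Dict.get?, pvLookup_eq]
  by_cases h11 : cl = "people"
  · subst h11
    simp [pvLoopA, pvSynonyms, PySem.Dict.getD, PySem.Dict.get?, pvLookup_eq]
  by_cases h12 : cl = "man"
  · subst h12
    simp [pvLoopA, pvSynonyms, PySem.Dict.getD, PySem.Dict.get?, pvLookup_eq]
  by_cases h13 : cl = "woman"
  · subst h13
    simp [pvLoopA, pvSynonyms, PySem.Dict.getD, PySem.Dict.get?, pvLookup_eq]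
  by_cases h14 : cl = "child"
  · subst h14
    simp [pvLoopA, pvSynonyms, PySem.Dict.getD, PySem.Dict.get?, pvLookup_eq]
  by_cases h15 : cl = "vehicle"
  · subst h15
    simp [pvLoopA, pvSynonyms, PySem.Dict.getD, PySem.Dict.get?, pvLookup_eq]
  by_cases h16 : cl = "automobile"
  · subst h16
    simp [pvLoopA, pvSynonyms, PySem.Dict.getD, PySem.Dict.get?, pvLookup_eq]
  by_cases h17 : cl = "auto"
  · subst h17
    simp [pvLoopA, pvSynonyms, PySem.Dict.getD, PySem.Dict.get?, pvLookup_eq]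
  by_cases h18 : cl = "puppy"
  · subst h18
    simp [pvLoopA, pvSynonyms, PySem.Dict.getD, PySem.Dict.get?, pvLookup_eq]
  by_cases h19 : cl = "canine"
  · subst h19
    simp [pvLoopA, pvSynonyms, PySem.Dict.getD, PySem.Dict.get?, pvLookup_eq]
  by_cases h20 : cl = "kitten"
  · subst h20
    simp [pvLoopA, pvSynonyms, PySem.Dict.getD, PySem.Dict.get?, pvLookup_eq]
  by_cases h21 : cl = "feline"
  · subst h21
    simp [pvLoopA, pvSynonyms, PySem.Dict.getD, PySem.Dict.get?, pvLookup_eq]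
  by_cases h22 : cl = "flying"
  · subst h22
    simp [pvLoopA, pvSynonyms, PySem.Dict.getD, PySem.Dict.get?, pvLookup_eq]
  by_cases h23 : cl = "winged"
  · subst h23
    simp [pvLoopA, pvSynonyms, PySem.Dict.getD, PySem.Dict.get?, pvLookup_eq]
  by_cases h24 : cl = "plant"
  · subst h24
    simp [pvLoopA, pvSynonyms, PySem.Dict.getD, PySem.Dict.get?, pvLookup_eq]
  by_cases h25 : cl = "vegetation"
  · subst h25
    simp [pvLoopA, pvSynonyms, PySem.Dict.getD, PySem.Dict.get?, pvLookup_eq]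
  by_cases h26 : cl = "house"
  · subst h26
    simp [pvLoopA, pvSynonyms, PySem.Dict.getD, PySem.Dict.get?, pvLookup_eq]
  by_cases h27 : cl = "structure"
  · subst h27
    simp [pvLoopA, pvSynonyms, PySem.Dict.getD, PySem.Dict.get?, pvLookup_eq]
  by_cases h28 : cl = "architecture"
  · subst h28
    simp [pvLoopA, pvSynonyms, PySem.Dict.getD, PySem.Dict.get?, pvLookup_eq]
  by_cases h29 : cl = "seat"
  · subst h29
    simp [pvLoopA, pvSynonyms, PySem.Dict.getD, PySem.Dict.get?, pvLookup_eq]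
  by_cases h30 : cl = "furniture"
  · subst h30
    simp [pvLoopA, pvSynonyms, PySem.Dict.getD, PySem.Dict.get?, pvLookup_eq]
  by_cases h31 : cl = "desk"
  · subst h31
    simp [pvLoopA, pvSynonyms, PySem.Dict.getD, PySem.Dict.get?, pvLookup_eq]
  by_cases h32 : cl = "surface"
  · subst h32
    simp [pvLoopA, pvSynonyms, PySem.Dict.getD, PySem.Dict.get?, pvLookup_eq]
  by_cases h33 : cl = "text"
  · subst h33
    simp [pvLoopA, pvSynonyms, PySem.Dict.getD, PySem.Dict.get?, pvLookup_eq]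
  by_cases h34 : cl = "reading"
  · subst h34
    simp [pvLoopA, pvSynonyms, PySem.Dict.getD, PySem.Dict.get?, pvLookup_eq]
  by_cases h35 : cl = "literature"
  · subst h35
    simp [pvLoopA, pvSynonyms, PySem.Dict.getD, PySem.Dict.get?, pvLookup_eq]
  · simp [pvLoopA, pvSynonyms, PySem.Dict.getD, PySem.Dict.get?, pvLookup_eq, h0, Ne.symm h0, h1, Ne.symm h1, h2, Ne.symm h2, h3, Ne.symm h3, h4, Ne.symm h4, h5, Ne.symm h5, h6, Ne.symm h6, h7, Ne.symm h7, h8, Ne.symm h8, h9, Ne.symm h9, Ne.symm h10, Ne.symm h11, Ne.symm h12, Ne.symm h13, Ne.symm h14, Ne.symm h15, Ne.symm h16, Ne.symm h17, Ne.symm h18, Ne.symm h19, Ne.symm h20, Ne.symm h21, Ne.symm h22, Ne.symm h23, Ne.symm h24, Ne.symm h25, Ne.symm h26, Ne.symm h27, Ne.symm h28, Ne.symm h29, Ne.symm h30, Ne.symm h31, Ne.symm h32, Ne.symm h33, Ne.symm h34, Ne.symm h35]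

-- ===== VERDICT (by name: the statement is the Claim_ definition above) =====
theorem is_description_match_py_spec : Claim_equal_is_description_match_py := by
  intro class_name description _
  unfold Spec_is_description_match_py is_description_match_py is_description_match_py_alt
  simp only [pvLoop_eq_lookup]
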